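-- pv_equiv track=rewrite | github.com/eternalseptember/Hacker-Rank | sorting/quick_sort_time.py | quick_sort_swaps
-- ===== SOURCE A (Python) =====
-- def quick_sort_swaps(arr, beg_index=0, pivot_index=None):
-- 	# pivot_index should only be None for first invocation.
-- 	# Recursive calls will supply pivot_index.
-- 	if pivot_index is None:
-- 		pivot_index = len(arr) - 1
--
-- 	size = len(arr[beg_index:pivot_index + 1])
--
-- 	if size <= 1:
-- 		return 0
--
-- 	pivot = arr[pivot_index]
-- 	large_part_index = None
-- 	swap = 0
--
-- 	# 1. Sort and swap the body.
-- 	for i in range(beg_index, pivot_index):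
-- 		if arr[i] > pivot:
-- 			if large_part_index is None:
-- 				large_part_index = i
-- 		else:
-- 			swap += 1
-- 			if large_part_index is not None:
-- 				arr[i], arr[large_part_index] = arr[large_part_index], arr[i]
-- 				large_part_index += 1
--
-- 	# 2. Then swap the pivot with the first item of the larger partition.
-- 	# Test cases require the final swap to count,
-- 	# regardless if it was already in the correct position, as in 2a.
-- 	swap += 1
-- 	if large_part_index is not None:
-- 		arr[pivot_index], arr[large_part_index] = arr[large_part_index], arr[pivot_index]
--
-- 	# 2a. Unless the pivot was the largest item.
-- 	# So partition again with the pivot point moved to the left once.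
-- 	else:
-- 		sub_swap = quick_sort_swaps(arr, beg_index, pivot_index - 1)
-- 		swap += sub_swap
--
-- 	# 3. Now partition the larger and smaller halves.
-- 	if large_part_index is not None:
-- 		left_swap = quick_sort_swaps(arr, beg_index, large_part_index - 1)
-- 		right_swap = quick_sort_swaps(arr, large_part_index + 1, pivot_index)
-- 		swap += left_swap + right_swap
--
-- 	return swap
-- ===== SOURCE B (Python) =====
-- # Iterative rewrite: explicit stack of (beg, pivot) ranges with a helper partition
-- # pass, instead of A's recursion; same in-place mutation of arr, same return value.
-- def _partition(arr, beg, piv):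
--     """Step-1 body pass: sort/swap the body against arr[piv]; returns
--     (large_part_index, swaps counted in this pass). Mutates arr in place."""
--     pivot = arr[piv]
--     lpi = None
--     swaps = 0
--     for i in range(beg, piv):
--         if arr[i] > pivot:
--             if lpi is None:
--                 lpi = i
--         else:
--             swaps += 1
--             if lpi is not None:
--                 arr[i], arr[lpi] = arr[lpi], arr[i]
--                 lpi += 1
--     return lpi, swaps
--
--
-- def quick_sort_swaps(arr, beg_index=0, pivot_index=None):
--     if pivot_index is None:
--         pivot_index = len(arr) - 1
--     total = 0
--     stack = [(beg_index, pivot_index)]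
--     while stack:
--         beg, piv = stack.pop()
--         if len(arr[beg:piv + 1]) <= 1:
--             continue
--         lpi, swaps = _partition(arr, beg, piv)
--         total += swaps + 1  # the pivot swap always counts
--         if lpi is None:
--             # pivot was the largest item: redo with pivot moved left once
--             stack.append((beg, piv - 1))
--         else:
--             arr[piv], arr[lpi] = arr[lpi], arr[piv]
--             stack.append((lpi + 1, piv))   # right half
--             stack.append((beg, lpi - 1))   # left half (processed first)
--     return total
-- ===== Notes on version B (the rewrite author's own statement) =====
-- stated objective: alternative
-- what changed: Replaced A's recursion (left/right/2a recursive calls) by an iterative driver with an explicit stack of (beg, pivot) ranges and a single swap accumulator, with the partition pass factored into a helper; same in-place mutation and same count.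
import Mathlib
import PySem

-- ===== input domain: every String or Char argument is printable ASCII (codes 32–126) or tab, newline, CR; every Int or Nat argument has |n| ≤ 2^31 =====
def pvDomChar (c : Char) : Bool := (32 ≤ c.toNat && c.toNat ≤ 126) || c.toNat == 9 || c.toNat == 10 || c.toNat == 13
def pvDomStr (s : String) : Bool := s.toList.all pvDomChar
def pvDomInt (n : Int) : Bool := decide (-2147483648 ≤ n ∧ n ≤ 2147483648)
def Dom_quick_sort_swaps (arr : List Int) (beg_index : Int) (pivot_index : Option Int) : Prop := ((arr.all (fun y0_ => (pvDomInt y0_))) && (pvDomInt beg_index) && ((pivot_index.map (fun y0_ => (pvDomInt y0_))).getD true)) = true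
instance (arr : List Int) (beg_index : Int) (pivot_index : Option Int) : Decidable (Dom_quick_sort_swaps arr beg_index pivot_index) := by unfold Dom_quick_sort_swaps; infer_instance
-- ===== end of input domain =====

-- B replaces A's recursion by an explicit stack of (beg, pivot) ranges; same swap count.
-- Both Pythons mutate arr in place identically; the equivalence proved here is about the
-- RETURN value (the swap count) only.

-- ===== PORT A =====
-- arr[i] (exact inside Pre_: indices reached are in range, so Python never raises there)
def pvGetI (arr : List Int) (i : Int) : Int := PySem.List.pyGetD arr i 0

-- arr[i] = v with Python's negative-index rule (exact for -len ≤ i < len, the only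
-- indices reached inside Pre_)
def pvSetI (arr : List Int) (i : Int) (v : Int) : List Int :=
  if 0 ≤ i then arr.set i.toNat v else arr.set ((arr.length : Int) + i).toNat v

-- arr[i], arr[j] = arr[j], arr[i]
def pvSwapI (arr : List Int) (i j : Int) : List Int :=
  let vi := pvGetI arr i
  let vj := pvGetI arr j
  pvSetI (pvSetI arr i vj) j vi

-- one iteration of A's step-1 body loop; state = (arr, large_part_index, swap)
def pvPartStepA (pivot : Int) (st : List Int × Option Int × Int) (i : Int) :
    List Int × Option Int × Int :=
  if pvGetI st.1 i > pivot then
    match st.2.1 with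
    | none => (st.1, some i, st.2.2)
    | some _ => st
  else
    match st.2.1 with
    | none => (st.1, none, st.2.2 + 1)
    | some l => (pvSwapI st.1 i l, some (l + 1), st.2.2 + 1)

-- 'for i in range(beg_index, pivot_index): …' of A
def pvPartitionA (arr : List Int) (beg piv : Int) : List Int × Option Int × Int :=
  (PySem.List.pyRange beg piv 1).foldl (pvPartStepA (pvGetI arr piv)) (arr, none, 0)

-- A's recursion; the Nat fuel is only a totality guard: the top call passes
-- (piv+1-beg).toNat + len + 1, every recursive call strictly shrinks either the raw
-- interval or (once it is empty) the clamped window, so fuel is never exhausted.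
def pvGoA : Nat → List Int → Int → Int → List Int × Int
  | 0, arr, _, _ => (arr, 0)
  | f + 1, arr, beg, piv =>
    if (PySem.List.slice arr (some beg) (some (piv + 1))).length ≤ 1 then (arr, 0)
    else
      let P := pvPartitionA arr beg piv
      match P.2.1 with
      | some l =>
          let r1 := pvGoA f (pvSwapI P.1 piv l) beg (l - 1)
          let r2 := pvGoA f r1.1 (l + 1) piv
          (r2.1, P.2.2 + 1 + r1.2 + r2.2)
      | none =>
          let r := pvGoA f P.1 beg (piv - 1)
          (r.1, P.2.2 + 1 + r.2)

def quick_sort_swaps (arr : List Int) (beg_index : Int) (pivot_index : Option Int) : Int :=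
  let piv := pivot_index.getD ((arr.length : Int) - 1)
  (pvGoA ((piv + 1 - beg_index).toNat + arr.length + 1) arr beg_index piv).2

-- ===== PORT B =====
-- B's _partition helper: identical body loop, written over the same range
def pvPartStepB (pivot : Int) (st : List Int × Option Int × Int) (i : Int) :
    List Int × Option Int × Int :=
  if pvGetI st.1 i > pivot then
    match st.2.1 with
    | none => (st.1, some i, st.2.2)
    | some _ => st
  else
    match st.2.1 with
    | none => (st.1, none, st.2.2 + 1)
    | some l => (pvSwapI st.1 i l, some (l + 1), st.2.2 + 1)

def pvPartitionB (arr : List Int) (beg piv : Int) : List Int × Option Int × Int :=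
  (PySem.List.pyRange beg piv 1).foldl (pvPartStepB (pvGetI arr piv)) (arr, none, 0)

-- B's 'while stack:' loop. Each frame carries a Nat fuel (totality guard only: the
-- initial frame gets its window size and pushed frames get fuel - 1, which always
-- covers their strictly smaller windows, so a fuel-0 frame has an empty window).
def pvLoopB : List (Nat × Int × Int) → List Int → Int → Int
  | [], _, acc => acc
  | (0, _, _) :: rest, arr, acc => pvLoopB rest arr acc
  | (f + 1, beg, piv) :: rest, arr, acc =>
    if (PySem.List.slice arr (some beg) (some (piv + 1))).length ≤ 1 then
      pvLoopB rest arr acc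
    else
      let P := pvPartitionB arr beg piv
      match P.2.1 with
      | none => pvLoopB ((f, beg, piv - 1) :: rest) P.1 (acc + P.2.2 + 1)
      | some l =>
          pvLoopB ((f, beg, l - 1) :: (f, l + 1, piv) :: rest)
            (pvSwapI P.1 piv l) (acc + P.2.2 + 1)
  termination_by st _ _ => (st.map (fun t => 3 ^ t.1)).sum
  decreasing_by
  · simp only [List.map_cons, List.sum_cons]; omega
  · simp only [List.map_cons, List.sum_cons]
    have h3 : 0 < 3 ^ f := Nat.pow_pos (by omega)
    have : 3 ^ (f + 1) = 3 ^ f * 3 := pow_succ 3 f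
    omega
  · simp only [List.map_cons, List.sum_cons]
    have h3 : 0 < 3 ^ f := Nat.pow_pos (by omega)
    have : 3 ^ (f + 1) = 3 ^ f * 3 := pow_succ 3 f
    omega
  · simp only [List.map_cons, List.sum_cons]
    have h3 : 0 < 3 ^ f := Nat.pow_pos (by omega)
    have : 3 ^ (f + 1) = 3 ^ f * 3 := pow_succ 3 f
    omega

def quick_sort_swaps_alt (arr : List Int) (beg_index : Int) (pivot_index : Option Int) : Int :=
  let piv := pivot_index.getD ((arr.length : Int) - 1)
  pvLoopB [((piv + 1 - beg_index).toNat + arr.length + 1, beg_index, piv)] arr 0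

-- ===== PRECONDITION & SPEC =====
-- Pre_ excludes beg_index < -len(arr) and an explicit pivot_index outside
-- [-len(arr), len(arr)): there A raises IndexError whenever the partition loop or the
-- pivot read is reached; degenerate windows (slice of size ≤ 1, where A returns 0
-- before touching any index) stay admitted; within Pre_ negative indices follow
-- Python's wraparound rule, which both ports model.
def Pre_quick_sort_swaps (arr : List Int) (beg_index : Int) (pivot_index : Option Int) : Prop :=
  (-(arr.length : Int) ≤ beg_index ∧
    (pivot_index.all
      (fun p => decide (-(arr.length : Int) ≤ p ∧ p < (arr.length : Int)))) = true) ∨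
  (PySem.List.slice arr (some beg_index)
      (some (pivot_index.getD ((arr.length : Int) - 1) + 1))).length ≤ 1
instance (arr : List Int) (beg_index : Int) (pivot_index : Option Int) :
    Decidable (Pre_quick_sort_swaps arr beg_index pivot_index) := by
  unfold Pre_quick_sort_swaps; infer_instance

def pvWitness_quick_sort_swaps : List Int × Int × Option Int := ([3, 1, 2, 1], 0, none)

def Spec_quick_sort_swaps (arr : List Int) (beg_index : Int) (pivot_index : Option Int) (out : Int) : Prop := out = quick_sort_swaps_alt arr beg_index pivot_index
instance (arr : List Int) (beg_index : Int) (pivot_index : Option Int) (out : Int) : Decidable (Spec_quick_sort_swaps arr beg_index pivot_index out) := by unfold Spec_quick_sort_swaps; infer_instance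

-- ===== CLAIM (what is proved, stated in full; the proofs are below) =====
def Claim_equal_quick_sort_swaps : Prop := ∀ (arr : List Int) (beg_index : Int) (pivot_index : Option Int), Dom_quick_sort_swaps arr beg_index pivot_index → Pre_quick_sort_swaps arr beg_index pivot_index → Spec_quick_sort_swaps arr beg_index pivot_index (quick_sort_swaps arr beg_index pivot_index)

-- ===== LEMMAS AND PROOFS =====

-- the two partition passes are written identically
theorem pvPartitionB_eq (arr : List Int) (beg piv : Int) :
    pvPartitionB arr beg piv = pvPartitionA arr beg piv := rfl

-- processing one stack frame of B = running A's recursion on that window, then the rest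
theorem pvLoopB_frame (f : Nat) :
    ∀ (arr : List Int) (beg piv : Int) (rest : List (Nat × Int × Int)) (acc : Int),
      pvLoopB ((f, beg, piv) :: rest) arr acc
        = pvLoopB rest (pvGoA f arr beg piv).1 (acc + (pvGoA f arr beg piv).2) := by
  induction f with
  | zero =>
    intro arr beg piv rest acc
    simp [pvLoopB, pvGoA]
  | succ f ih =>
    intro arr beg piv rest acc
    rw [pvLoopB, pvGoA]
    by_cases hsz : (PySem.List.slice arr (some beg) (some (piv + 1))).length ≤ 1
    · simp [hsz]
    · simp only [hsz, if_false, pvPartitionB_eq]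
      cases hl : (pvPartitionA arr beg piv).2.1 with
      | none =>
        dsimp only
        rw [ih]
        congr 1
        ring
      | some l =>
        dsimp only
        rw [ih, ih]
        congr 1
        ring

theorem quick_sort_swaps_spec : Claim_equal_quick_sort_swaps := by
  intro arr beg_index pivot_index _ _
  unfold Spec_quick_sort_swaps quick_sort_swaps quick_sort_swaps_alt
  rw [pvLoopB_frame]
  simp [pvLoopB]
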